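-- pv_equiv track=rewrite | github.com/letzgorats/2021_BOJ | Programmers/level2/구명보트/구명보트.py | solution
-- ===== SOURCE A (Python) =====
-- def solution(people, limit):
--     answer = 0
--     standard = limit  # standard라는 변수에 기존 limit 저장
--     n = len(people) # n이라는 변수에 people 리스트의 길이 저장(사람 수)
--     remove_list = []    # remove_list 라는 빈 리스트 생성(태울 사람을 임시로 저장하는 리스트)
--     total = 0   # total이라는 변수 ( 이 변수는 내가 최대 2명을 태울 것이라는 것을 못보고 한번에 태울 수 있는 사람 수를 저장하기 위해 변수를 잡음)
--     people = sorted(people,reverse=True)    # people을 내림차순으로 정렬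
--
--     while n!=0: # n이 0이 될 때까지(무인도의 사람을 다 태울 때까지)
--         remove_list.clear() # 태울사람을 임시로 저장하는 리스트는 다시 clear
--         standard = limit  # standard는 다시 limit으로 초기화
--
--         for p in people:    # 내림차순으로 정렬된 people 리스트를 돌면서
--             if standard == 0:   # standard가 0이 되면
--                 break   # 빠져나온다
--             if standard > 0:    # standard가 양수이면(아직 태울 수 있는 사람이 있을 수 있는 조건)
--                 standard -= p   # standard에 우선 지금 for문을 통해 돌고 있는 사람 무게(p)를 빼주고
--                 if standard < 0 :   # 음수라면
--                     standard += p   # 다시 복구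
--                 else:   # 여전히 0보다 크거나 같다면
--                     total += 1  # 그 사람은 태울 수 있는 것(total += 1)
--                     remove_list.append(p)   # remove_list에도 그 사람을 추가해준다.
--         n-= total   # limit을 기준으로 total 수 만큼의 사람을 태울 수 있으니까 총 사람수인 n에서 total을 빼준다.
--         total = 0   # total을 다시 0으로 초기화
--
--         for i in remove_list:   # remove_list를 돌면서 포함되어있는 사람을
--             people.remove(i)    # people 리스트에서 제거해준다.
--         answer += 1 # answer은 한번 보트를 태운 횟수를 뜻함 +1
--
--     return answer
-- ===== SOURCE B (Python) =====
-- def solution(people, limit):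
--     # Per boat: one partition pass over the remaining (descending-sorted) people,
--     # boarding each who fits the remaining capacity; no remove-list / list.remove scans.
--     rest = sorted(people, reverse=True)
--     answer = 0
--     while rest:
--         cap = limit
--         nxt = []
--         for p in rest:
--             if cap > 0 and p <= cap:
--                 cap -= p
--             else:
--                 nxt.append(p)
--         rest = nxt
--         answer += 1
--     return answer
-- ===== Notes on version B (the rewrite author's own statement) =====
-- stated objective: simpler
-- what changed: Each boat is filled by a single partition pass that keeps the leftover passengers directly, replacing A's select-into-remove_list phase followed by a list.remove scan per boarded person and the n/total bookkeeping.
import Mathlib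
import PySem

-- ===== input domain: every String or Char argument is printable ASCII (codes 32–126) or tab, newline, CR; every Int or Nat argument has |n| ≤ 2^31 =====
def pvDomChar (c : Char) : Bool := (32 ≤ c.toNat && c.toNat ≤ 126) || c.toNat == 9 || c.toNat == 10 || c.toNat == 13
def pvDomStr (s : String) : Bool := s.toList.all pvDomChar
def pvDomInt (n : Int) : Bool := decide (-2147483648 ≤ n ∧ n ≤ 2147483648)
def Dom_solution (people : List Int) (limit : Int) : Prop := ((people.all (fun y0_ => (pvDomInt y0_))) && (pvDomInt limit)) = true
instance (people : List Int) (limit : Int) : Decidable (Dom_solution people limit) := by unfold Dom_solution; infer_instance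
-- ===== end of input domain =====

-- B fills each boat in one partition pass over the descending-sorted leftovers (simpler: no
-- remove_list, no repeated list.remove, no n/total counters). Return-value equivalence only;
-- neither program mutates its arguments observably (A rebinds `people`).

-- ===== PORT A =====
-- people.remove(i): in A the removed value is always present, so ValueError never occurs;
-- getD keeps the port total on that unreachable path.
def aRemoveD (l : List Int) (x : Int) : List Int := (PySem.List.remove? l x).getD l

-- the inner `for p in people` loop: state (standard, total, remove_list), with A's break at standard == 0
def aFor (standard total : Int) (rl : List Int) : List Int → Int × List Int
  | [] => (total, rl)
  | p :: rest =>
    if standard = 0 then (total, rl)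
    else if standard > 0 then
      if standard - p < 0 then aFor standard total rl rest
      else aFor (standard - p) (total + 1) (rl ++ [p]) rest
    else aFor standard total rl rest

-- the outer `while n != 0` loop; fuel = initial length + 1 covers every terminating Python run
-- (each iteration of a terminating run removes at least one person)
def aWhile (limit : Int) : Nat → List Int → Int → Int → Int
  | 0, _, _, answer => answer
  | fuel + 1, people, n, answer =>
    if n = 0 then answer
    else
      let r := aFor limit 0 [] people
      aWhile limit fuel (r.2.foldl aRemoveD people) (n - r.1) (answer + 1)

def solution (people : List Int) (limit : Int) : Int :=
  let ppl := PySem.List.sorted people (fun x => x) true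
  aWhile limit (ppl.length + 1) ppl (ppl.length : Int) 0

-- ===== PORT B =====
-- one partition pass per boat: state (cap, nxt)
def bRound (st : Int × List Int) (p : Int) : Int × List Int :=
  if 0 < st.1 ∧ p ≤ st.1 then (st.1 - p, st.2) else (st.1, st.2 ++ [p])

def bWhile (limit : Int) : Nat → List Int → Int → Int
  | 0, _, answer => answer
  | fuel + 1, rest, answer =>
    if rest.isEmpty then answer
    else bWhile limit fuel (rest.foldl bRound (limit, [])).2 (answer + 1)

def solution_alt (people : List Int) (limit : Int) : Int :=
  let rest := PySem.List.sorted people (fun x => x) true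
  bWhile limit (rest.length + 1) rest 0

-- ===== PRECONDITION & SPEC =====
-- No Pre_: the two Pythons run identical rounds, so they return (and loop forever) on exactly
-- the same inputs, and the two ports share the same fuel and the same round-by-round state,
-- so they are equal on every input.
def Spec_solution (people : List Int) (limit : Int) (out : Int) : Prop := out = solution_alt people limit
instance (people : List Int) (limit : Int) (out : Int) : Decidable (Spec_solution people limit out) := by unfold Spec_solution; infer_instance

-- ===== CLAIM (what is proved, stated in full; the proofs are below) =====
def Claim_equal_solution : Prop := ∀ (people : List Int) (limit : Int), Dom_solution people limit → Spec_solution people limit (solution people limit)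

-- ===== LEMMAS AND PROOFS =====

-- the common greedy round: (taken, skipped) for one boat of capacity cap
def roundGo (cap : Int) : List Int → List Int × List Int
  | [] => ([], [])
  | p :: rest =>
    if 0 < cap ∧ p ≤ cap then
      let r := roundGo (cap - p) rest; (p :: r.1, r.2)
    else
      let r := roundGo cap rest; (r.1, p :: r.2)

theorem roundGo_nonpos (l : List Int) (cap : Int) (h : cap ≤ 0) : roundGo cap l = ([], l) := by
  induction l with
  | nil => rfl
  | cons p rest ih => simp [roundGo, ih]; omega

theorem aFor_eq (l : List Int) : ∀ (standard total : Int) (rl : List Int),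
    aFor standard total rl l = (total + ((roundGo standard l).1.length : Int), rl ++ (roundGo standard l).1) := by
  induction l with
  | nil => intro s t rl; simp [aFor, roundGo]
  | cons p rest ih =>
    intro s t rl
    by_cases h0 : s = 0
    · subst h0
      simp [aFor, roundGo_nonpos (p :: rest) 0 (le_refl 0)]
    · by_cases hpos : s > 0
      · by_cases hneg : s - p < 0
        · have hps : ¬ p ≤ s := by omega
          simp [aFor, h0, hpos, hneg, roundGo, hps, ih]
        · have hc : (0 < s ∧ p ≤ s) := by omega
          simp [aFor, h0, hpos, hneg, roundGo, hc, ih]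
          omega
      · have hc : ¬ (0 < s ∧ p ≤ s) := by omega
        have hps : ¬ 0 < s := by omega
        simp [aFor, h0, hpos, roundGo, ih]

theorem bFold_eq (l : List Int) : ∀ (cap : Int) (acc : List Int),
    (l.foldl bRound (cap, acc)).2 = acc ++ (roundGo cap l).2 := by
  induction l with
  | nil => intro cap acc; simp [roundGo]
  | cons p rest ih =>
    intro cap acc
    by_cases hc : 0 < cap ∧ p ≤ cap
    · simp [List.foldl, bRound, hc, roundGo, ih]
    · simp [List.foldl, bRound, hc, roundGo, ih]

theorem roundGo_skipped_sublist (l : List Int) : ∀ cap, (roundGo cap l).2.Sublist l := by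
  induction l with
  | nil => intro cap; simp [roundGo]
  | cons p rest ih =>
    intro cap
    by_cases hc : 0 < cap ∧ p ≤ cap
    · simp only [roundGo, if_pos hc]
      exact List.Sublist.cons p (ih (cap - p))
    · simp only [roundGo, if_neg hc]
      exact List.Sublist.cons₂ p (ih cap)

theorem roundGo_length (l : List Int) : ∀ cap,
    (roundGo cap l).1.length + (roundGo cap l).2.length = l.length := by
  induction l with
  | nil => intro cap; simp [roundGo]
  | cons p rest ih =>
    intro cap
    by_cases hc : 0 < cap ∧ p ≤ cap
    · simp only [roundGo, if_pos hc, List.length_cons]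
      have := ih (cap - p); omega
    · simp only [roundGo, if_neg hc, List.length_cons]
      have := ih cap; omega

-- every boarded person is strictly lighter than an unfitting head p
theorem taken_lt (p : Int) (_hp : 0 < p) (l : List Int) : ∀ cap,
    l.Pairwise (fun a b => b ≤ a) → (∀ q ∈ l, q ≤ p) → (cap < p ∨ ∀ q ∈ l, q < p) →
    ∀ q ∈ (roundGo cap l).1, q < p := by
  induction l with
  | nil => intro cap _ _ _ q hq; simp [roundGo] at hq
  | cons r rest ih =>
    intro cap hsort hle hd q hq
    have hsort' := (List.pairwise_cons.mp hsort).2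
    have hhead := (List.pairwise_cons.mp hsort).1
    by_cases hc : 0 < cap ∧ r ≤ cap
    · simp only [roundGo, if_pos hc] at hq
      rcases List.mem_cons.mp hq with h | h
      · subst h
        rcases hd with hcap | hall
        · omega
        · exact hall _ (by simp)
      · refine ih (cap - r) hsort' (fun x hx => hle x (List.mem_cons_of_mem r hx)) ?_ q h
        by_cases hcr : cap - r < p
        · exact Or.inl hcr
        · rcases hd with hcap | hall
          · -- r < 0 here, so the tail is all negative hence < p
            refine Or.inr (fun x hx => ?_)
            have := hhead x hx
            omega
          · exact Or.inr (fun x hx => hall x (List.mem_cons_of_mem r hx))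
    · simp only [roundGo, if_neg hc] at hq
      refine ih cap hsort' (fun x hx => hle x (List.mem_cons_of_mem r hx)) ?_ q hq
      rcases hd with hcap | hall
      · exact Or.inl hcap
      · exact Or.inr (fun x hx => hall x (List.mem_cons_of_mem r hx))

theorem foldl_removeD_cons (t : List Int) : ∀ (p : Int) (rest : List Int),
    (∀ q ∈ t, q ≠ p) → t.foldl aRemoveD (p :: rest) = p :: t.foldl aRemoveD rest := by
  induction t with
  | nil => intro p rest _; rfl
  | cons q t ih =>
    intro p rest hne
    have hqp : p ≠ q := fun h => (hne q List.mem_cons_self) h.symm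
    have h1 : aRemoveD (p :: rest) q = p :: aRemoveD rest q := by
      unfold aRemoveD
      rw [PySem.List.remove?_cons_of_ne rest hqp]
      cases h : PySem.List.remove? rest q with
      | none => simp
      | some l => simp
    simp only [List.foldl, h1]
    exact ih p (aRemoveD rest q) (fun x hx => hne x (List.mem_cons_of_mem q hx))

theorem remove_taken (l : List Int) : ∀ cap, l.Pairwise (fun a b => b ≤ a) →
    (roundGo cap l).1.foldl aRemoveD l = (roundGo cap l).2 := by
  induction l with
  | nil => intro cap _; simp [roundGo]
  | cons p rest ih =>
    intro cap hsort
    have hsort' := (List.pairwise_cons.mp hsort).2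
    have hhead := (List.pairwise_cons.mp hsort).1
    by_cases hc : 0 < cap ∧ p ≤ cap
    · simp only [roundGo, if_pos hc]
      have h1 : aRemoveD (p :: rest) p = rest := by
        unfold aRemoveD; rw [PySem.List.remove?_cons_self p rest]; rfl
      simp only [List.foldl, h1]
      exact ih (cap - p) hsort'
    · simp only [roundGo, if_neg hc]
      by_cases hcap : cap ≤ 0
      · rw [roundGo_nonpos rest cap hcap]
        rfl
      · -- 0 < cap < p
        have hp : 0 < p := by omega
        have hlt : ∀ q ∈ (roundGo cap rest).1, q < p :=
          taken_lt p hp rest cap hsort' hhead (Or.inl (by omega))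
        rw [foldl_removeD_cons _ p rest (fun q hq => by have := hlt q hq; omega)]
        rw [ih cap hsort']

theorem main_loop (limit : Int) : ∀ (fuel : Nat) (l : List Int) (answer : Int),
    l.Pairwise (fun a b => b ≤ a) →
    aWhile limit fuel l (l.length : Int) answer = bWhile limit fuel l answer := by
  intro fuel
  induction fuel with
  | zero => intro l answer _; rfl
  | succ fuel ih =>
    intro l answer hsort
    by_cases hnil : l = []
    · subst hnil; simp [aWhile, bWhile]
    · rw [aWhile, bWhile, if_neg (by simpa using hnil), if_neg (by simpa using hnil)]
      rw [aFor_eq]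
      simp only
      rw [List.nil_append, remove_taken l limit hsort, bFold_eq, List.nil_append]
      have hlen2 : ((l.length : Int) - (0 + ((roundGo limit l).1.length : Int))) = ((roundGo limit l).2.length : Int) := by
        have := roundGo_length l limit; push_cast [← this]; ring
      rw [hlen2]
      exact ih (roundGo limit l).2 (answer + 1)
        (hsort.sublist (roundGo_skipped_sublist l limit))

-- ===== VERDICT (by name: the statement is the Claim_ definition above) =====
theorem solution_spec : Claim_equal_solution := by
  intro people limit _
  unfold Spec_solution solution solution_alt
  exact main_loop limit _ _ 0 (PySem.List.sorted_pairwise_rev people (fun x => x))
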